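-- pv_equiv track=rewrite | github.com/CMG-GUTS/metataxonx | bin/python/validate_mapping.py | check_duplicate_headers
-- ===== SOURCE A (Python) =====
-- def check_duplicate_headers(lines, errors):
--     header = lines[0].upper().split('\t')
--     original_header = lines[0].split('\t')
--     if len(header) != len(set(header)):
--         duplicates = []
--         for i, element in enumerate(header):
--             if header.count(element) != 1:
--                 duplicates.append(original_header[i])
--         duplicates = list(set(duplicates))
--         errors.append(f"One or more duplicates in header: {'; '.join(duplicates)}\n")
--     return errors
-- ===== SOURCE B (Python) =====
-- def check_duplicate_headers(lines, errors):
--     pairs = sorted(zip(lines[0].upper().split('\t'), lines[0].split('\t')),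
--                    key=lambda p: p[0])
--     dups = set()
--     for k in range(len(pairs)):
--         u, o = pairs[k]
--         if (k > 0 and pairs[k - 1][0] == u) or \
--            (k + 1 < len(pairs) and pairs[k + 1][0] == u):
--             dups.add(o)
--     if dups:
--         errors.append(f"One or more duplicates in header: {'; '.join(sorted(dups))}\n")
--     return errors
-- ===== Notes on version B (the rewrite author's own statement) =====
-- stated objective: alternative
-- what changed: A calls header.count(element) inside a loop over all headers (quadratic); B sorts the (uppercased, original) header pairs by uppercased key and detects duplicates by comparing each pair with its immediate neighbours in the sorted order (sort-then-adjacent-scan).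
-- outside the precondition, e.g. on check_duplicate_headers([], []): A raises IndexError, B raises IndexError
import Mathlib
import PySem

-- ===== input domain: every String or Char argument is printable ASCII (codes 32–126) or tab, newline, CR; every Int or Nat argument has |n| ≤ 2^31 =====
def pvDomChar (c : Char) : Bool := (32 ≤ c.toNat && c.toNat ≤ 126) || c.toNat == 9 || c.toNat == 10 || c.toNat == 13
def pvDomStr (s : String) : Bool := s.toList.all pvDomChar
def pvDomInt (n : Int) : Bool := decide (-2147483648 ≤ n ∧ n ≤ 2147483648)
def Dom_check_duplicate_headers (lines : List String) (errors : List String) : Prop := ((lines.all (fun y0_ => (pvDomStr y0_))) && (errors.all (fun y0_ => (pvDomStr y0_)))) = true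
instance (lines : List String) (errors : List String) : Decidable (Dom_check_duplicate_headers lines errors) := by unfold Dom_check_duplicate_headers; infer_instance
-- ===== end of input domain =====

-- B finds duplicates by sorting the (uppercased, original) header pairs by uppercased key and
-- comparing each pair with its neighbours (sort-then-adjacent-scan), instead of A's per-element
-- count() scans; both programs append to `errors` in Python (same mutation); the theorems are
-- about the returned list.

-- s.split('\t') (exact: PySem.Chars.splitOn is Python's split for a non-empty separator)
def pvSplitTab (s : String) : List String :=
  (PySem.Chars.splitOn s.toList ['\t']).map String.ofList

-- ===== PORT A =====
def check_duplicate_headers (lines : List String) (errors : List String) : List String :=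
  match lines with
  | [] => errors
  | l0 :: _ =>
    let header := pvSplitTab (PySem.Str.upper l0)
    let original_header := pvSplitTab l0
    if header.length ≠ (PySem.Set.ofList header).length then
      let duplicates : List String :=
        (PySem.List.enumerate header).foldl (fun acc p =>
          if PySem.List.count header p.2 ≠ 1 then
            match PySem.List.pyGet? original_header p.1 with
            | some x => acc ++ [x]
            | none => acc
          else acc) []
      let dupset : PySem.Set String := PySem.Set.ofList duplicates
      errors ++ [PySem.Str.join "" ["One or more duplicates in header: ",
                                    PySem.Str.join "; " dupset, "\n"]]
    else errors

-- ===== PORT B =====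
-- the neighbour test 'pairs[k-1][0] == u or pairs[k+1][0] == u' (guarded by the range checks,
-- exactly as in Source B; pyGetD's default is never the compared value thanks to the && guards)
def pvNbr (pairs : List (String × String)) (k : Int) : Bool :=
  (decide (0 < k) && ((PySem.List.pyGetD pairs (k-1) ("","")).1 == (PySem.List.pyGetD pairs k ("","")).1))
  || (decide (k+1 < (pairs.length : Int)) && ((PySem.List.pyGetD pairs (k+1) ("","")).1 == (PySem.List.pyGetD pairs k ("","")).1))

def check_duplicate_headers_alt (lines : List String) (errors : List String) : List String :=
  match lines with
  | [] => errors
  | l0 :: _ =>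
    let pairs := PySem.List.sorted
      ((pvSplitTab (PySem.Str.upper l0)).zip (pvSplitTab l0)) (fun p => p.1)
    let dups : PySem.Set String :=
      (PySem.List.pyRange 0 (pairs.length : Int) 1).foldl (fun s k =>
        if pvNbr pairs k then PySem.Set.add s ((PySem.List.pyGetD pairs k ("","")).2) else s)
        PySem.Set.empty
    if dups ≠ [] then
      errors ++ [PySem.Str.join "" ["One or more duplicates in header: ",
                                    PySem.Str.join "; " (PySem.List.sorted dups (fun s => s)), "\n"]]
    else errors

-- ===== PRECONDITION & SPEC =====
-- the distinct original-case spellings found at header positions whose uppercased form is repeated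
def pvDupOf (h : List String) (o : List String) : List String :=
  PySem.Set.ofList (((h.zip o).filter (fun p => 2 ≤ PySem.List.count h p.1)).map (·.2))

-- Pre_ excludes (a) empty `lines`, where A raises IndexError on lines[0], and (b) first lines with
-- two or more DISTINCT duplicated header spellings, where the order of A's "'; '.join(list(set(...)))"
-- is an accident of Python's randomized string hashing and no fixed order can be claimed.
def Pre_check_duplicate_headers (lines : List String) (errors : List String) : Prop :=
  lines ≠ [] ∧
  (pvDupOf (pvSplitTab (PySem.Str.upper lines.headI)) (pvSplitTab lines.headI)).length ≤ 1
instance (lines : List String) (errors : List String) : Decidable (Pre_check_duplicate_headers lines errors) := by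
  unfold Pre_check_duplicate_headers; infer_instance

def pvWitness_check_duplicate_headers : List String × List String := (["A\tA\tB"], ["prev"])

def Spec_check_duplicate_headers (lines : List String) (errors : List String) (out : List String) : Prop := out = check_duplicate_headers_alt lines errors
instance (lines : List String) (errors : List String) (out : List String) : Decidable (Spec_check_duplicate_headers lines errors out) := by unfold Spec_check_duplicate_headers; infer_instance

-- ===== CLAIM (what is proved, stated in full; the proofs are below) =====
def Claim_equal_check_duplicate_headers : Prop := ∀ (lines : List String) (errors : List String), Dom_check_duplicate_headers lines errors → Pre_check_duplicate_headers lines errors → Spec_check_duplicate_headers lines errors (check_duplicate_headers lines errors)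

-- ===== LEMMAS AND PROOFS =====

-- the duplicate-position predicate both programs detect
def pvQ (o : List String) (x : String) : Prop :=
  ∃ i, ∃ _ : i < o.length,
    1 < List.count (PySem.Str.upper o[i]) (o.map PySem.Str.upper) ∧ x = o[i]

theorem pv_upperChar_eq_tab_iff (c : Char) : PySem.Chars.upperChar c = '\t' ↔ c = '\t' := by
  constructor
  · intro hc
    by_cases hl : PySem.Chars.islower c
    · exfalso
      simp only [PySem.Chars.upperChar, hl, if_true] at hc
      have hb : (97 : Nat) ≤ c.toNat ∧ c.toNat ≤ 122 := by
        simp only [PySem.Chars.islower, Bool.and_eq_true, decide_eq_true_eq] at hl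
        exact ⟨hl.1, hl.2⟩
      have hv : Nat.isValidChar (c.toNat - 32) := Or.inl (by omega)
      have h9 := congrArg Char.toNat hc
      rw [Char.toNat_ofNat, if_pos hv] at h9
      have ht : Char.toNat '\t' = 9 := by decide
      rw [ht] at h9
      omega
    · simpa [PySem.Chars.upperChar, hl] using hc
  · intro hc; subst hc; decide

theorem pv_beq_tab_upperChar (c : Char) :
    ('\t' == PySem.Chars.upperChar c) = ('\t' == c) := by
  by_cases h : c = '\t'
  · subst h; decide
  · have h2 : PySem.Chars.upperChar c ≠ '\t' := fun hh => h ((pv_upperChar_eq_tab_iff c).1 hh)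
    simp [Ne.symm h2]
    exact fun hh => h hh.symm

theorem pv_go_map_upper (fuel : Nat) (l cur : List Char) (acc : List (List Char)) :
    PySem.Chars.splitOn.go ['\t'] fuel (l.map PySem.Chars.upperChar)
      (cur.map PySem.Chars.upperChar) (acc.map (List.map PySem.Chars.upperChar)) =
    (PySem.Chars.splitOn.go ['\t'] fuel l cur acc).map (List.map PySem.Chars.upperChar) := by
  induction fuel generalizing l cur acc with
  | zero =>
    rw [PySem.Chars.splitOn.go.eq_def, PySem.Chars.splitOn.go.eq_def]
    simp
  | succ fuel ih =>
    cases l with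
    | nil =>
      rw [PySem.Chars.splitOn.go.eq_def, PySem.Chars.splitOn.go.eq_def]
      simp
    | cons c rest =>
      conv_lhs => rw [PySem.Chars.splitOn.go.eq_def]
      conv_rhs => rw [PySem.Chars.splitOn.go.eq_def]
      simp only [List.map_cons, List.isPrefixOf, Bool.and_true,
        pv_beq_tab_upperChar]
      by_cases htab : ('\t' == c) = true
      · simp only [htab, if_true, List.length_cons, List.length_nil, List.drop_succ_cons,
          List.drop_zero]
        have := ih rest [] (cur.reverse :: acc)
        simpa using this
      · simp only [Bool.not_eq_true] at htab
        simp only [htab, Bool.false_eq_true, if_false]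
        exact ih rest (c :: cur) acc

theorem pv_splitTab_upper (s : String) :
    pvSplitTab (PySem.Str.upper s) = (pvSplitTab s).map PySem.Str.upper := by
  unfold pvSplitTab
  rw [PySem.Str.toList_upper]
  unfold PySem.Chars.splitOn
  have hlen : (PySem.Chars.upper s.toList).length = s.toList.length := by
    simp [PySem.Chars.upper]
  rw [hlen]
  have h2 := pv_go_map_upper (s.toList.length + 1) s.toList [] []
  simp only [List.map_nil] at h2
  simp only [PySem.Chars.upper]
  rw [h2, List.map_map, List.map_map]
  apply List.map_congr_left
  intro a _
  simp [PySem.Str.upper, PySem.Chars.upper, String.toList_ofList, Function.comp]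

-- generic: membership in a conditional-add fold of a PySem.Set
theorem pv_mem_addfold {α : Type} [BEq α] [LawfulBEq α]
    (l : List Int) (c : Int → Bool) (f : Int → α) (s0 : PySem.Set α) (x : α) :
    x ∈ l.foldl (fun s k => if c k then PySem.Set.add s (f k) else s) s0 ↔
      x ∈ s0 ∨ ∃ k ∈ l, c k ∧ x = f k := by
  induction l generalizing s0 with
  | nil => simp
  | cons a t ih =>
    rw [List.foldl_cons]
    by_cases ha : c a
    · rw [if_pos ha, ih]
      constructor
      · rintro (hs | ⟨k, hk, hc, hx⟩)
        · rcases (PySem.Set.mem_add _ _ _).1 hs with hs | rfl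
          · exact Or.inl hs
          · exact Or.inr ⟨a, List.mem_cons_self, ha, rfl⟩
        · exact Or.inr ⟨k, List.mem_cons_of_mem _ hk, hc, hx⟩
      · rintro (hs | ⟨k, hk, hc, hx⟩)
        · exact Or.inl ((PySem.Set.mem_add _ _ _).2 (Or.inl hs))
        · rcases List.mem_cons.1 hk with rfl | hk
          · exact Or.inl ((PySem.Set.mem_add _ _ _).2 (Or.inr hx))
          · exact Or.inr ⟨k, hk, hc, hx⟩
    · rw [if_neg ha, ih]
      constructor
      · rintro (hs | ⟨k, hk, hc, hx⟩)
        · exact Or.inl hs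
        · exact Or.inr ⟨k, List.mem_cons_of_mem _ hk, hc, hx⟩
      · rintro (hs | ⟨k, hk, hc, hx⟩)
        · exact Or.inl hs
        · rcases List.mem_cons.1 hk with rfl | hk
          · exact absurd hc ha
          · exact Or.inr ⟨k, hk, hc, hx⟩

theorem pv_nodup_addfold {α : Type} [BEq α] [LawfulBEq α]
    (l : List Int) (c : Int → Bool) (f : Int → α) (s0 : PySem.Set α) (hs : s0.Nodup) :
    (l.foldl (fun s k => if c k then PySem.Set.add s (f k) else s) s0).Nodup := by
  induction l generalizing s0 with
  | nil => exact hs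
  | cons a t ih =>
    rw [List.foldl_cons]
    by_cases ha : c a
    · rw [if_pos ha]; exact ih _ (PySem.Set.nodup_add _ _ hs)
    · rw [if_neg ha]; exact ih _ hs

theorem pv_mem_zip (o : List String) (p : String × String) :
    p ∈ (o.map PySem.Str.upper).zip o ↔
      ∃ i, ∃ _ : i < o.length, p = (PySem.Str.upper o[i], o[i]) := by
  rw [List.mem_iff_getElem]
  constructor
  · rintro ⟨i, hi, hp⟩
    rw [List.length_zip, List.length_map, Nat.min_self] at hi
    refine ⟨i, hi, ?_⟩
    rw [← hp, List.getElem_zip, List.getElem_map]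
  · rintro ⟨i, hi, hp⟩
    refine ⟨i, by rw [List.length_zip, List.length_map, Nat.min_self]; exact hi, ?_⟩
    rw [List.getElem_zip, List.getElem_map, hp]

theorem pv_mem_pvDupOf (o : List String) (x : String) :
    x ∈ pvDupOf (o.map PySem.Str.upper) o ↔ pvQ o x := by
  unfold pvDupOf pvQ
  rw [PySem.Set.mem_ofList, List.mem_map]
  constructor
  · rintro ⟨p, hp, hx⟩
    rw [List.mem_filter] at hp
    obtain ⟨i, hi, rfl⟩ := (pv_mem_zip o p).1 hp.1
    refine ⟨i, hi, ?_, hx.symm⟩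
    have := hp.2
    simp only [decide_eq_true_eq, PySem.List.count_eq] at this
    omega
  · rintro ⟨i, hi, hcnt, rfl⟩
    refine ⟨(PySem.Str.upper o[i], o[i]), ?_, rfl⟩
    rw [List.mem_filter]
    refine ⟨(pv_mem_zip o _).2 ⟨i, hi, rfl⟩, ?_⟩
    simp only [decide_eq_true_eq, PySem.List.count_eq]
    omega

theorem pv_guard_iff (o : List String) :
    (o.map PySem.Str.upper).length ≠ (PySem.Set.ofList (o.map PySem.Str.upper)).length ↔
      ∃ x, pvQ o x := by
  set h := o.map PySem.Str.upper with hh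
  have hcard : (PySem.Set.ofList h).length = h.dedup.length := by
    have hnd := PySem.Set.nodup_ofList h
    have hfs : (PySem.Set.ofList h : List String).toFinset = h.toFinset := by
      apply Finset.ext
      intro a
      simp [List.mem_toFinset, PySem.Set.mem_ofList]
    have h1 := List.toFinset_card_of_nodup hnd
    have h2 := List.card_toFinset h
    rw [hfs] at h1
    omega
  rw [hcard]
  have hiff : h.length ≠ h.dedup.length ↔ ¬ h.Nodup := by
    constructor
    · intro hne hnd
      exact hne (by rw [hnd.dedup])
    · intro hnd hne
      have hsub := List.dedup_sublist h
      have : h.dedup = h := hsub.eq_of_length hne.symm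
      exact hnd (this ▸ h.nodup_dedup)
  rw [hiff, List.nodup_iff_count_le_one]
  push Not
  constructor
  · rintro ⟨a, ha⟩
    have hmem : a ∈ h := by
      have : 0 < h.count a := by omega
      exact List.count_pos_iff.1 this
    obtain ⟨i, hi, rfl⟩ := List.mem_iff_getElem.1 hmem
    rw [hh] at hi
    rw [List.length_map] at hi
    refine ⟨o[i], i, hi, ?_, rfl⟩
    have hgm : h[i]'(by simpa [hh] using hi) = PySem.Str.upper o[i] := by
      simp [hh]
    rw [← hgm]
    omega
  · rintro ⟨x, i, hi, hcnt, rfl⟩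
    exact ⟨PySem.Str.upper o[i], by omega⟩

theorem pv_nodup_eq_of_small (u v : List String) (hu : u.Nodup) (hv : v.Nodup)
    (hm : ∀ x, x ∈ u ↔ x ∈ v) (hlen : u.length ≤ 1) : u = v := by
  match u, hlen with
  | [], _ =>
    symm
    rw [List.eq_nil_iff_forall_not_mem]
    intro x hx
    exact (List.not_mem_nil (a := x)) ((hm x).2 hx)
  | [a], _ =>
    have hav : a ∈ v := (hm a).1 List.mem_cons_self
    match v, hv, hav with
    | b :: t, hv, hav =>
      have hb : b = a := by
        have : b ∈ [a] := (hm b).2 List.mem_cons_self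
        simpa using this
      subst hb
      have ht : t = [] := by
        rw [List.eq_nil_iff_forall_not_mem]
        intro c hc
        have : c ∈ [b] := (hm c).2 (List.mem_cons_of_mem _ hc)
        have hcb : c = b := by simpa using this
        exact (List.nodup_cons.1 hv).1 (hcb ▸ hc)
      rw [ht]

-- A's duplicates list, characterised
theorem pv_mem_dupA (o : List String) (x : String) :
    x ∈ PySem.Set.ofList
      ((PySem.List.enumerate (o.map PySem.Str.upper)).foldl (fun acc p =>
        if PySem.List.count (o.map PySem.Str.upper) p.2 ≠ 1 then
          match PySem.List.pyGet? o p.1 with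
          | some y => acc ++ [y]
          | none => acc
        else acc) []) ↔ pvQ o x := by
  set h := o.map PySem.Str.upper with hh
  have hfold : (PySem.List.enumerate h).foldl (fun acc p =>
        if PySem.List.count h p.2 ≠ 1 then
          match PySem.List.pyGet? o p.1 with
          | some y => acc ++ [y]
          | none => acc
        else acc) [] =
      ((PySem.List.enumerate h).filter
        (fun p => decide (PySem.List.count h p.2 ≠ 1))).map
        (fun p => PySem.List.pyGetD o p.1 "") := by
    rw [PySem.List.foldl_congr_mem (PySem.List.enumerate h) _
      (fun acc p => if decide (PySem.List.count h p.2 ≠ 1) = true then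
          acc ++ [PySem.List.pyGetD o p.1 ""] else acc) []
      ?_]
    · simpa using PySem.List.foldl_append_if
        (fun p : Int × String => decide (PySem.List.count h p.2 ≠ 1))
        (fun p => PySem.List.pyGetD o p.1 "") (PySem.List.enumerate h) []
    · intro acc p hp
      obtain ⟨k, hk, rfl⟩ := (PySem.List.mem_enumerate_iff h 0 p).1 hp
      have hk' : k < o.length := by simpa [hh] using hk
      have hg : PySem.List.pyGet? o ((0:Int) + k) = some (o[k]'hk') := by
        rw [zero_add, PySem.List.pyGet?_natCast, List.getElem?_eq_getElem hk']
      have hgD : PySem.List.pyGetD o ((0:Int) + k) "" = o[k]'hk' := by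
        rw [PySem.List.pyGetD_eq_getElem o "" (by omega) (by omega)]
        congr 1
        omega
      simp only [decide_eq_true_eq]
      by_cases hc : PySem.List.count h (h[k]'hk) ≠ 1
      · rw [if_pos hc, if_pos hc, hg, hgD]
      · rw [if_neg hc, if_neg hc]
  rw [hfold, PySem.Set.mem_ofList, List.mem_map]
  constructor
  · rintro ⟨p, hp, rfl⟩
    rw [List.mem_filter] at hp
    obtain ⟨k, hk, rfl⟩ := (PySem.List.mem_enumerate_iff h 0 p).1 hp.1
    have hk' : k < o.length := by simpa [hh] using hk
    have hc := hp.2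
    simp only [decide_eq_true_eq, PySem.List.count_eq] at hc
    have hgm : h[k]'hk = PySem.Str.upper (o[k]'hk') := by simp [hh]
    refine ⟨k, hk', ?_, ?_⟩
    · rw [hgm] at hc
      have hpos : 0 < List.count (PySem.Str.upper (o[k]'hk')) h :=
        List.count_pos_iff.2 (hgm ▸ List.getElem_mem hk)
      rw [← hh]
      omega
    · rw [PySem.List.pyGetD_eq_getElem o "" (by omega) (by push_cast; omega)]
      congr 1
      omega
  · rintro ⟨i, hi, hcnt, rfl⟩
    have hi' : i < h.length := by simpa [hh] using hi
    refine ⟨((0:Int) + i, h[i]'hi'), ?_, ?_⟩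
    · rw [List.mem_filter]
      refine ⟨(PySem.List.mem_enumerate_iff h 0 _).2 ⟨i, hi', rfl⟩, ?_⟩
      simp only [decide_eq_true_eq, PySem.List.count_eq]
      have hgm : h[i]'hi' = PySem.Str.upper o[i] := by simp [hh]
      rw [hgm]
      rw [← hh] at hcnt
      omega
    · rw [PySem.List.pyGetD_eq_getElem o "" (by omega) (by push_cast; omega)]
      congr 1
      omega

-- monotone access on a Pairwise-(≤) list
theorem pv_pairwise_getElem_le (m : List String) (hm : m.Pairwise (· ≤ ·))
    (p q : Nat) (hpq : p ≤ q) (hq : q < m.length) :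
    m[p]'(by omega) ≤ m[q] := by
  rcases Nat.lt_or_ge p q with h | h
  · exact (List.pairwise_iff_getElem.1 hm) p q (by omega) hq h
  · have : p = q := by omega
    subst this
    exact le_rfl

-- two distinct positions sharing a value force count > 1
theorem pv_two_pos_count (m : List String) (i j : Nat) (hij : i < j) (hj : j < m.length)
    (hi : m[i]'(by omega) = m[j]) : 1 < List.count (m[j]) m := by
  set u := m[j] with hu
  have hdrop : u ∈ m.drop j := by
    rw [List.drop_eq_getElem_cons hj, ← hu]
    exact List.mem_cons_self
  have htake : u ∈ m.take j := by
    rw [← hi]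
    have hlen : i < (m.take j).length := by
      rw [List.length_take]
      omega
    have : (m.take j)[i]'hlen = m[i]'(by omega) := List.getElem_take
    exact this ▸ List.getElem_mem hlen
  have key : List.count u m = List.count u (m.take j) + List.count u (m.drop j) := by
    conv_lhs => rw [← List.take_append_drop j m]
    rw [List.count_append]
  have h1 := List.count_pos_iff.2 htake
  have h2 := List.count_pos_iff.2 hdrop
  omega

-- in a sorted (Pairwise ≤) list, a repeated value has an equal neighbour
theorem pv_cond_iff_count (m : List String) (hm : m.Pairwise (· ≤ ·))
    (k : Nat) (hk : k < m.length) :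
    ((0 < k ∧ m[k-1]'(by omega) = m[k]) ∨ (∃ h : k+1 < m.length, m[k+1]'h = m[k])) ↔
      1 < List.count (m[k]) m := by
  constructor
  · rintro (⟨hk0, he⟩ | ⟨hk1, he⟩)
    · exact pv_two_pos_count m (k-1) k (by omega) hk he
    · rw [← he]
      exact pv_two_pos_count m k (k+1) (by omega) hk1 he.symm
  · intro hcnt
    by_contra hno
    push Not at hno
    obtain ⟨h1, h2⟩ := hno
    set u := m[k] with hu
    have hta : List.count u (m.take k) = 0 := by
      rw [List.count_eq_zero]
      intro hmem
      obtain ⟨i, hi, hgi⟩ := List.mem_iff_getElem.1 hmem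
      have hilen : i < k := by
        have := hi
        rw [List.length_take] at this
        omega
      have hgi' : m[i]'(by omega) = u := by
        have : (m.take k)[i]'hi = m[i]'(by omega) := List.getElem_take
        rw [← this, hgi]
      have hk0 : 0 < k := by omega
      have hle1 : m[i]'(by omega) ≤ m[k-1]'(by omega) :=
        pv_pairwise_getElem_le m hm i (k-1) (by omega) (by omega)
      have hle2 : m[k-1]'(by omega) ≤ u := hu ▸ pv_pairwise_getElem_le m hm (k-1) k (by omega) hk
      have : m[k-1]'(by omega) = u := le_antisymm hle2 (hgi' ▸ hle1)
      exact (h1 hk0) this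
    have hdr : List.count u (m.drop (k+1)) = 0 := by
      rw [List.count_eq_zero]
      intro hmem
      obtain ⟨i, hi, hgi⟩ := List.mem_iff_getElem.1 hmem
      have hilen : k + 1 + i < m.length := by
        have := hi
        rw [List.length_drop] at this
        omega
      have hgi' : m[k+1+i]'hilen = u := by
        have : (m.drop (k+1))[i]'hi = m[k+1+i]'hilen := List.getElem_drop
        rw [← this, hgi]
      have hk1 : k + 1 < m.length := by omega
      have hle1 : m[k+1]'hk1 ≤ m[k+1+i]'hilen :=
        pv_pairwise_getElem_le m hm (k+1) (k+1+i) (by omega) hilen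
      have hle2 : u ≤ m[k+1]'hk1 := hu ▸ pv_pairwise_getElem_le m hm k (k+1) (by omega) hk1
      have : m[k+1]'hk1 = u := le_antisymm (hgi' ▸ hle1) hle2
      exact (h2 hk1) this
    have key : List.count u m = List.count u (m.take k) + List.count u (m.drop k) := by
      conv_lhs => rw [← List.take_append_drop k m]
      rw [List.count_append]
    have hdc : m.drop k = u :: m.drop (k+1) := by
      rw [List.drop_eq_getElem_cons hk, ← hu]
    rw [hdc, List.count_cons_self, hta, hdr] at key
    omega

-- B's dups set, characterised
theorem pv_mem_dupB (o : List String) (x : String) :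
    x ∈ (PySem.List.pyRange 0
          ((PySem.List.sorted ((o.map PySem.Str.upper).zip o) (fun p => p.1)).length : Int) 1).foldl
        (fun s k =>
          if pvNbr (PySem.List.sorted ((o.map PySem.Str.upper).zip o) (fun p => p.1)) k then
            PySem.Set.add s
              ((PySem.List.pyGetD (PySem.List.sorted ((o.map PySem.Str.upper).zip o) (fun p => p.1))
                k ("","")).2)
          else s)
        PySem.Set.empty ↔ pvQ o x := by
  set z := (o.map PySem.Str.upper).zip o with hz
  set s := PySem.List.sorted z (fun p => p.1) with hs
  have hperm : s.Perm z := PySem.List.sorted_perm z (fun p => p.1) false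
  have hlenz : z.length = o.length := by
    rw [hz, List.length_zip, List.length_map, Nat.min_self]
  have hlens : s.length = o.length := by
    rw [hperm.length_eq, hlenz]
  have hmono : (s.map (fun p => p.1)).Pairwise (· ≤ ·) :=
    PySem.List.sorted_map_key_pairwise z (fun p => p.1)
  have hmperm : (s.map (fun p => p.1)).Perm (o.map PySem.Str.upper) := by
    have h1 : (s.map (fun p => p.1)).Perm (z.map (fun p => p.1)) := hperm.map _
    have h2 : z.map (fun p : String × String => p.1) = o.map PySem.Str.upper := by
      rw [hz]
      exact List.map_fst_zip (by simp)
    rw [h2] at h1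
    exact h1
  set m := s.map (fun p : String × String => p.1) with hm
  have hmlen : m.length = s.length := by rw [hm, List.length_map]
  rw [pv_mem_addfold]
  have hemp : ¬ (x ∈ (PySem.Set.empty : PySem.Set String)) := List.not_mem_nil
  constructor
  · rintro (habs | ⟨k, hkr, hc, rfl⟩)
    · exact absurd habs hemp
    rw [PySem.List.mem_pyRange_one] at hkr
    obtain ⟨hk0, hkn⟩ := hkr
    set j := k.toNat with hj
    have hjlt : j < s.length := by omega
    have hkj : k = (j : Int) := by omega
    have hgk : PySem.List.pyGetD s k ("","") = s[j]'hjlt := by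
      rw [PySem.List.pyGetD_eq_getElem s ("","") hk0 hkn]
    -- translate the Bool neighbour test into the Prop condition on m
    have hcnt : 1 < List.count (m[j]'(by omega)) m := by
      rw [← pv_cond_iff_count m hmono j (by omega)]
      unfold pvNbr at hc
      rw [Bool.or_eq_true, Bool.and_eq_true, Bool.and_eq_true] at hc
      rcases hc with ⟨hd, hbe⟩ | ⟨hd, hbe⟩
      · left
        have hj0 : 0 < j := by
          have := of_decide_eq_true hd
          omega
        refine ⟨hj0, ?_⟩
        have he := eq_of_beq hbe
        have hg1 : PySem.List.pyGetD s (k-1) ("","") = s[j-1]'(by omega) := by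
          rw [PySem.List.pyGetD_eq_getElem s ("","") (by omega) (by omega)]
          congr 1
          omega
        rw [hg1, hgk] at he
        simpa [hm] using he
      · right
        have hj1 : j + 1 < s.length := by
          have := of_decide_eq_true hd
          omega
        refine ⟨by omega, ?_⟩
        have he := eq_of_beq hbe
        have hg1 : PySem.List.pyGetD s (k+1) ("","") = s[j+1]'(by omega) := by
          rw [PySem.List.pyGetD_eq_getElem s ("","") (by omega) (by omega)]
          congr 1
          omega
        rw [hg1, hgk] at he
        simpa [hm] using he
    -- transfer to pvQ
    have hmem : s[j]'hjlt ∈ z := hperm.mem_iff.1 (List.getElem_mem hjlt)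
    obtain ⟨i, hi, hpe⟩ := (pv_mem_zip o _).1 (hz ▸ hmem)
    refine ⟨i, hi, ?_, ?_⟩
    · have hcnt' : 1 < List.count ((s[j]'hjlt).1) (o.map PySem.Str.upper) := by
        have hmj : m[j]'(by omega) = (s[j]'hjlt).1 := by simp [hm]
        rw [hmj] at hcnt
        rwa [hmperm.count_eq] at hcnt
      rw [hpe] at hcnt'
      exact hcnt'
    · rw [hgk, hpe]
  · rintro ⟨i, hi, hcnt, rfl⟩
    -- the pair (upper o[i], o[i]) sits somewhere in s; its position passes the neighbour test
    have hmemz : (PySem.Str.upper o[i], o[i]) ∈ z := (pv_mem_zip o _).2 ⟨i, hi, rfl⟩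
    have hmems : (PySem.Str.upper o[i], o[i]) ∈ s := hperm.mem_iff.2 hmemz
    obtain ⟨j, hjlt, hje⟩ := List.mem_iff_getElem.1 hmems
    have hcm : 1 < List.count (m[j]'(by omega)) m := by
      have hmj : m[j]'(by omega) = (s[j]'hjlt).1 := by simp [hm]
      rw [hmj, hje]
      show 1 < List.count (PySem.Str.upper o[i]) m
      rw [hmperm.count_eq]
      exact hcnt
    have hcond := (pv_cond_iff_count m hmono j (by omega)).2 hcm
    refine Or.inr ⟨(j : Int), ?_, ?_, ?_⟩
    · rw [PySem.List.mem_pyRange_one]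
      constructor
      · omega
      · exact_mod_cast hjlt
    · unfold pvNbr
      rw [Bool.or_eq_true, Bool.and_eq_true, Bool.and_eq_true]
      have hgk : PySem.List.pyGetD s (j : Int) ("","") = s[j]'hjlt := by
        rw [PySem.List.pyGetD_eq_getElem s ("","") (by omega) (by exact_mod_cast hjlt)]
        simp
      rcases hcond with ⟨hj0, he⟩ | ⟨hj1, he⟩
      · left
        refine ⟨by rw [decide_eq_true_eq]; exact_mod_cast hj0, ?_⟩
        have hg1 : PySem.List.pyGetD s ((j : Int)-1) ("","") = s[j-1]'(by omega) := by
          rw [PySem.List.pyGetD_eq_getElem s ("","") (by omega) (by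
            have := hjlt
            omega)]
          congr 1
          omega
        rw [hg1, hgk]
        apply beq_iff_eq.2
        simpa [hm] using he
      · right
        have hj1' : j + 1 < s.length := by omega
        refine ⟨by rw [decide_eq_true_eq]; rw [hmlen] at hj1; omega, ?_⟩
        have hg1 : PySem.List.pyGetD s ((j : Int)+1) ("","") = s[j+1]'hj1' := by
          rw [PySem.List.pyGetD_eq_getElem s ("","") (by omega) (by omega)]
          have hidx : ((j:Int)+1).toNat = j+1 := by omega
          simp [hidx]
        rw [hg1, hgk]
        apply beq_iff_eq.2
        simpa [hm] using he
    · have hgk : PySem.List.pyGetD s (j : Int) ("","") = s[j]'hjlt := by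
        rw [PySem.List.pyGetD_eq_getElem s ("","") (by omega) (by exact_mod_cast hjlt)]
        simp
      rw [hgk, hje]

-- sorting a list of at most one element changes nothing
theorem pv_sorted_small (l : List String) (h : l.length ≤ 1) :
    PySem.List.sorted l (fun s => s) = l := by
  match l, h with
  | [], _ => rfl
  | [x], _ => rfl

-- ===== VERDICT (by name: the statement is the Claim_ definition above) =====
theorem check_duplicate_headers_spec : Claim_equal_check_duplicate_headers := by
  intro lines errors _hDom hPre
  unfold Spec_check_duplicate_headers
  obtain ⟨hne, hsmall⟩ := hPre
  cases lines with
  | nil => exact absurd rfl hne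
  | cons l0 rest =>
    simp only [List.headI] at hsmall
    rw [pv_splitTab_upper l0] at hsmall
    show check_duplicate_headers (l0 :: rest) errors = check_duplicate_headers_alt (l0 :: rest) errors
    simp only [check_duplicate_headers, check_duplicate_headers_alt]
    rw [pv_splitTab_upper l0]
    set o := pvSplitTab l0 with ho
    by_cases hex : ∃ x, pvQ o x
    · rw [if_pos ((pv_guard_iff o).2 hex)]
      have hBne : (PySem.List.pyRange 0
            ((PySem.List.sorted ((o.map PySem.Str.upper).zip o) (fun p => p.1)).length : Int) 1).foldl
          (fun s k =>
            if pvNbr (PySem.List.sorted ((o.map PySem.Str.upper).zip o) (fun p => p.1)) k then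
              PySem.Set.add s
                ((PySem.List.pyGetD (PySem.List.sorted ((o.map PySem.Str.upper).zip o) (fun p => p.1))
                  k ("","")).2)
            else s)
          PySem.Set.empty ≠ [] := by
        obtain ⟨x, hx⟩ := hex
        exact List.ne_nil_of_mem ((pv_mem_dupB o x).2 hx)
      rw [if_pos hBne]
      have hAB : PySem.Set.ofList
          ((PySem.List.enumerate (o.map PySem.Str.upper)).foldl (fun acc p =>
            if PySem.List.count (o.map PySem.Str.upper) p.2 ≠ 1 then
              match PySem.List.pyGet? o p.1 with
              | some y => acc ++ [y]
              | none => acc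
            else acc) []) =
          (PySem.List.pyRange 0
            ((PySem.List.sorted ((o.map PySem.Str.upper).zip o) (fun p => p.1)).length : Int) 1).foldl
          (fun s k =>
            if pvNbr (PySem.List.sorted ((o.map PySem.Str.upper).zip o) (fun p => p.1)) k then
              PySem.Set.add s
                ((PySem.List.pyGetD (PySem.List.sorted ((o.map PySem.Str.upper).zip o) (fun p => p.1))
                  k ("","")).2)
            else s)
          PySem.Set.empty := by
        have h1 := pv_nodup_eq_of_small (pvDupOf (o.map PySem.Str.upper) o) _
          (PySem.Set.nodup_ofList _) (PySem.Set.nodup_ofList _)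
          (fun x => (pv_mem_pvDupOf o x).trans (pv_mem_dupA o x).symm) hsmall
        have h2 := pv_nodup_eq_of_small (pvDupOf (o.map PySem.Str.upper) o) _
          (PySem.Set.nodup_ofList _)
          (pv_nodup_addfold _ _ _ PySem.Set.empty List.nodup_nil)
          (fun x => (pv_mem_pvDupOf o x).trans (pv_mem_dupB o x).symm) hsmall
        rw [← h1, ← h2]
      have hlenB : ((PySem.List.pyRange 0
            ((PySem.List.sorted ((o.map PySem.Str.upper).zip o) (fun p => p.1)).length : Int) 1).foldl
          (fun s k =>
            if pvNbr (PySem.List.sorted ((o.map PySem.Str.upper).zip o) (fun p => p.1)) k then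
              PySem.Set.add s
                ((PySem.List.pyGetD (PySem.List.sorted ((o.map PySem.Str.upper).zip o) (fun p => p.1))
                  k ("","")).2)
            else s)
          PySem.Set.empty).length ≤ 1 := by
        rw [← hAB]
        have hlenA := pv_nodup_eq_of_small (pvDupOf (o.map PySem.Str.upper) o) _
          (PySem.Set.nodup_ofList _) (PySem.Set.nodup_ofList _)
          (fun x => (pv_mem_pvDupOf o x).trans (pv_mem_dupA o x).symm) hsmall
        rw [← hlenA]
        exact hsmall
      rw [hAB, pv_sorted_small _ hlenB]
    · rw [if_neg (fun hg => hex ((pv_guard_iff o).1 hg)), if_neg ?_]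
      intro hBne
      obtain ⟨x, hx⟩ := List.exists_mem_of_ne_nil _ hBne
      exact hex ⟨x, (pv_mem_dupB o x).1 hx⟩
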